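-- pv_equiv track=rewrite | github.com/Anny-waay/IS-2022-AppliedMath | sem5/lab1/main.py | find_max_el_ind
-- ===== SOURCE A (Python) =====
-- def find_max_el_ind(b, escape_ind):
--     max = 0
--     max_i = -1
--     for i in range(len(b)):
--         if i != escape_ind and b[i] >= max:
--             max = b[i]
--             max_i = i
--     return max_i + 1
-- ===== SOURCE B (Python) =====
-- def find_max_el_ind(b, escape_ind):
--     # pass 1: the maximum of the allowed values, floored at 0
--     best = 0
--     for i, v in enumerate(b):
--         if i != escape_ind and v > best:
--             best = v
--     # pass 2: last allowed index holding that maximum (1-based), else 0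
--     res = 0
--     for i, v in enumerate(b):
--         if i != escape_ind and v == best:
--             res = i + 1
--     return res
-- ===== Notes on version B (the rewrite author's own statement) =====
-- stated objective: alternative
-- what changed: Replaces A's single running-(max,index) scan by two independent passes: first compute the maximum allowed value (floored at 0), then find the last allowed index holding it.
import Mathlib
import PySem

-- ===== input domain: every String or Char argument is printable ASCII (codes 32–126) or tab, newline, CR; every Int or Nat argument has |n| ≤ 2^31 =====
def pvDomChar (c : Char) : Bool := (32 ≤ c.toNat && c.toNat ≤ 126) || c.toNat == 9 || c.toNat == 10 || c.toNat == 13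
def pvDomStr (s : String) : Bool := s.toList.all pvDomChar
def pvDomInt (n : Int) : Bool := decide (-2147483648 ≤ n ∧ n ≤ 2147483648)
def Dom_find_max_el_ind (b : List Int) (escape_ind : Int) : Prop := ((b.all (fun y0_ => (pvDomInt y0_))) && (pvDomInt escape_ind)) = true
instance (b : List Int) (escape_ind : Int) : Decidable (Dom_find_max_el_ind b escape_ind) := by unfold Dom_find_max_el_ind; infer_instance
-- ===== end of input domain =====

-- B replaces A's single running-(max,index) scan by two passes (max of allowed values floored at 0, then last allowed index holding it): an alternative decomposition, same cost.

-- ===== PORT A =====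
-- for i in range(len(b)): if i != escape_ind and b[i] >= max: max, max_i = b[i], i
-- (i always in range, so b[i] is exact as b.getD i 0)
def find_max_el_ind (b : List Int) (escape_ind : Int) : Int :=
  let st := (List.range b.length).foldl
    (fun (s : Int × Int) (i : Nat) =>
      if (i : Int) ≠ escape_ind ∧ b.getD i 0 ≥ s.1 then (b.getD i 0, (i : Int)) else s)
    (0, -1)
  st.2 + 1

-- ===== PORT B =====
def find_max_el_ind_alt (b : List Int) (escape_ind : Int) : Int :=
  let best := b.zipIdx.foldl
    (fun (m : Int) (p : Int × Nat) =>
      if (p.2 : Int) ≠ escape_ind ∧ p.1 > m then p.1 else m) 0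
  b.zipIdx.foldl
    (fun (r : Int) (p : Int × Nat) =>
      if (p.2 : Int) ≠ escape_ind ∧ p.1 = best then (p.2 : Int) + 1 else r) 0

-- ===== PRECONDITION & SPEC =====
def Spec_find_max_el_ind (b : List Int) (escape_ind : Int) (out : Int) : Prop := out = find_max_el_ind_alt b escape_ind
instance (b : List Int) (escape_ind : Int) (out : Int) : Decidable (Spec_find_max_el_ind b escape_ind out) := by unfold Spec_find_max_el_ind; infer_instance

-- ===== CLAIM (what is proved, stated in full; the proofs are below) =====
def Claim_equal_find_max_el_ind : Prop := ∀ (b : List Int) (escape_ind : Int), Dom_find_max_el_ind b escape_ind → Spec_find_max_el_ind b escape_ind (find_max_el_ind b escape_ind)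

-- ===== LEMMAS AND PROOFS =====

-- A's index-loop over range(len b) equals the same loop over zipIdx pairs
theorem rangeFold_eq_zipIdxFold {σ : Type} (b : List Int) (f : σ → Int → Nat → σ) (init : σ) :
    (List.range b.length).foldl (fun s i => f s (b.getD i 0) i) init
      = b.zipIdx.foldl (fun s p => f s p.1 p.2) init := by
  induction b using List.reverseRecOn generalizing init with
  | nil => simp
  | append_singleton c x ih =>
    have hlen : (c ++ [x]).length = c.length + 1 := by simp
    rw [hlen, List.range_succ, List.foldl_append, List.zipIdx_append, List.zipIdx_singleton,
        List.foldl_append]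
    have hcong : (List.range c.length).foldl (fun s i => f s ((c ++ [x]).getD i 0) i) init
        = (List.range c.length).foldl (fun s i => f s (c.getD i 0) i) init := by
      refine PySem.List.foldl_congr_mem _ _ _ _ (fun acc i hi => ?_)
      rw [List.getD_append _ _ _ _ (List.mem_range.mp hi)]
    rw [hcong, ih]
    simp [List.getD]

-- proof-only abbreviations for the three folds
def pvStA (e : Int) (zs : List (Int × Nat)) : Int × Int :=
  zs.foldl (fun (s : Int × Int) p =>
    if (p.2 : Int) ≠ e ∧ p.1 ≥ s.1 then (p.1, (p.2 : Int)) else s) (0, -1)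

def pvM (e : Int) (zs : List (Int × Nat)) : Int :=
  zs.foldl (fun (m : Int) p => if (p.2 : Int) ≠ e ∧ p.1 > m then p.1 else m) 0

def pvR (e M r0 : Int) (zs : List (Int × Nat)) : Int :=
  zs.foldl (fun (r : Int) p => if (p.2 : Int) ≠ e ∧ p.1 = M then (p.2 : Int) + 1 else r) r0

-- the core invariant relating A's single pass to B's two passes:
-- A's running max equals B's first-pass max, and A's index (+1) equals B's second pass
theorem key (e : Int) (zs : List (Int × Nat)) :
    (pvStA e zs).1 = pvM e zs ∧ (pvStA e zs).2 + 1 = pvR e (pvM e zs) 0 zs := by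
  induction zs using List.reverseRecOn with
  | nil => exact ⟨rfl, rfl⟩
  | append_singleton zs p ih =>
    obtain ⟨h1, h4⟩ := ih
    have eA : pvStA e (zs ++ [p]) =
        if (p.2 : Int) ≠ e ∧ p.1 ≥ (pvStA e zs).1 then (p.1, (p.2 : Int)) else pvStA e zs := by
      simp [pvStA, List.foldl_append]
    have eM : pvM e (zs ++ [p]) =
        if (p.2 : Int) ≠ e ∧ p.1 > pvM e zs then p.1 else pvM e zs := by
      simp [pvM, List.foldl_append]
    have eR : ∀ M r0, pvR e M r0 (zs ++ [p]) =
        if (p.2 : Int) ≠ e ∧ p.1 = M then (p.2 : Int) + 1 else pvR e M r0 zs := by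
      intro M r0; simp [pvR, List.foldl_append]
    by_cases ha : (p.2 : Int) ≠ e
    · rcases lt_trichotomy p.1 (pvStA e zs).1 with hlt | heq | hgt
      · -- strictly below the running max: all three folds keep their state
        have gA : pvStA e (zs ++ [p]) = pvStA e zs := by
          rw [eA, if_neg]; rintro ⟨_, hge⟩; omega
        have gM : pvM e (zs ++ [p]) = pvM e zs := by
          rw [eM, if_neg]; rintro ⟨_, hgtm⟩; rw [← h1] at hgtm; omega
        have gR : pvR e (pvM e zs) 0 (zs ++ [p]) = pvR e (pvM e zs) 0 zs := by
          rw [eR, if_neg]; rintro ⟨_, hv⟩; rw [← h1] at hv; omega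
        exact ⟨by rw [gA, gM]; exact h1, by rw [gA, gM, gR]; exact h4⟩
      · -- ties the running max: A moves its index, B's second pass matches at this element
        have hpm : p.1 = pvM e zs := heq.trans h1
        have gA : pvStA e (zs ++ [p]) = (p.1, (p.2 : Int)) := by
          rw [eA, if_pos ⟨ha, ge_of_eq heq⟩]
        have gM : pvM e (zs ++ [p]) = pvM e zs := by
          rw [eM, if_neg]; rintro ⟨_, hgtm⟩; rw [← h1, ← heq] at hgtm; omega
        have gR : pvR e (pvM e zs) 0 (zs ++ [p]) = (p.2 : Int) + 1 := by
          rw [eR, if_pos ⟨ha, hpm⟩]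
        exact ⟨by rw [gA, gM]; exact hpm, by rw [gA, gM, gR]⟩
      · -- a new strict maximum: B's second pass matches at this last element
        have hM : pvM e zs < p.1 := by rw [← h1]; exact hgt
        have gA : pvStA e (zs ++ [p]) = (p.1, (p.2 : Int)) := by
          rw [eA, if_pos ⟨ha, le_of_lt hgt⟩]
        have gM : pvM e (zs ++ [p]) = p.1 := by rw [eM, if_pos ⟨ha, hM⟩]
        have gR : pvR e p.1 0 (zs ++ [p]) = (p.2 : Int) + 1 := by
          rw [eR, if_pos ⟨ha, rfl⟩]
        exact ⟨by rw [gA, gM], by rw [gA, gM, gR]⟩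
    · -- the escaped index: all three folds skip this element
      have gA : pvStA e (zs ++ [p]) = pvStA e zs := by
        rw [eA, if_neg]; rintro ⟨h, _⟩; exact ha h
      have gM : pvM e (zs ++ [p]) = pvM e zs := by
        rw [eM, if_neg]; rintro ⟨h, _⟩; exact ha h
      have gR : pvR e (pvM e zs) 0 (zs ++ [p]) = pvR e (pvM e zs) 0 zs := by
        rw [eR, if_neg]; rintro ⟨h, _⟩; exact ha h
      exact ⟨by rw [gA, gM]; exact h1, by rw [gA, gM, gR]; exact h4⟩

-- ===== VERDICT (by name: the statement is the Claim_ definition above) =====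
theorem find_max_el_ind_spec : Claim_equal_find_max_el_ind := by
  intro b e _
  unfold Spec_find_max_el_ind find_max_el_ind find_max_el_ind_alt
  rw [rangeFold_eq_zipIdxFold b (fun s v i => if (i : Int) ≠ e ∧ v ≥ s.1 then (v, (i : Int)) else s)]
  exact (key e b.zipIdx).2
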